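-- pv_equiv track=rewrite | github.com/jahnavijanu06/python_programming | m n k values.py | remove_duplicates_entirely
-- ===== SOURCE A (Python) =====
-- def remove_duplicates_entirely(arr):
--
--     arr.sort()
--
--     frequency = {}
--     for num in arr:
--         if num in frequency:
--             frequency[num] += 1
--         else:
--             frequency[num] = 1
--
--
--     result = [num for num in arr if frequency[num] == 1]
--
--     return result
-- ===== SOURCE B (Python) =====
-- def remove_duplicates_entirely(arr):
--     arr.sort()
--     result = []
--     n = len(arr)
--     i = 0
--     while i < n:
--         # advance j past the run of elements equal to arr[i]
--         j = i + 1
--         while j < n and arr[j] == arr[i]: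
--             j += 1
--         if j - i == 1:
--             result.append(arr[i])
--         i = j
--     return result
-- ===== Notes on version B (the rewrite author's own statement) =====
-- stated objective: simpler
-- what changed: Replaces the frequency dictionary and the count==1 filter pass with a single recursive adjacency sweep over the sorted list that keeps an element exactly when its run of equal neighbours has length 1.
import Mathlib
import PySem

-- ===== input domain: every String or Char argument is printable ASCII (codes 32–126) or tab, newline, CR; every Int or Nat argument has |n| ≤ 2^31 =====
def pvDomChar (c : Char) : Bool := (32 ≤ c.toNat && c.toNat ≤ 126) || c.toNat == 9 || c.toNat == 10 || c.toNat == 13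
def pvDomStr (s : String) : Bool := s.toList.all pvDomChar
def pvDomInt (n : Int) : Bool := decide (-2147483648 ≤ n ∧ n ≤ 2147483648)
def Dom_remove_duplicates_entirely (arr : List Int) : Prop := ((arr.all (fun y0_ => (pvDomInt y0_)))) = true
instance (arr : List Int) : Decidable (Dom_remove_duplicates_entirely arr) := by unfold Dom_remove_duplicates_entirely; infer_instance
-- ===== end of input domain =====

-- B replaces A's frequency dictionary with a single adjacency (run) sweep over the
-- sorted list; equivalence is about the RETURN value (A also sorts `arr` in place,
-- and B keeps that same `arr.sort()` side effect).

-- ===== PORT A =====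
def remove_duplicates_entirely (arr : List Int) : List Int :=
  let s := PySem.List.sorted arr (fun x => x) false
  let frequency := s.foldl
    (fun d num => if d.contains num then d.modify num 0 (· + 1) else d.insert num 1)
    (PySem.Dict.empty : PySem.Dict Int Int)
  s.filter (fun num => frequency.getD num 0 == 1)

-- ===== PORT B =====
-- Source B's inner `sweep`: take the run of leading equal elements, keep the head iff the
-- run has length 1, recurse on the remainder.
def pvSweep : List Int → List Int
  | [] => []
  | x :: rest =>
    let run := rest.takeWhile (fun y => y == x)
    let rest' := rest.dropWhile (fun y => y == x)
    (if run.isEmpty then [x] else []) ++ pvSweep rest'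
termination_by xs => xs.length
decreasing_by
  simp only [List.length_cons]
  exact Nat.lt_succ_of_le (List.length_dropWhile_le _ _)

def remove_duplicates_entirely_alt (arr : List Int) : List Int :=
  pvSweep (PySem.List.sorted arr (fun x => x) false)

-- ===== PRECONDITION & SPEC =====
def Spec_remove_duplicates_entirely (arr : List Int) (out : List Int) : Prop := out = remove_duplicates_entirely_alt arr
instance (arr : List Int) (out : List Int) : Decidable (Spec_remove_duplicates_entirely arr out) := by unfold Spec_remove_duplicates_entirely; infer_instance

-- ===== CLAIM (what is proved, stated in full; the proofs are below) =====
def Claim_equal_remove_duplicates_entirely : Prop := ∀ (arr : List Int), Dom_remove_duplicates_entirely arr → Spec_remove_duplicates_entirely arr (remove_duplicates_entirely arr)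

-- ===== LEMMAS AND PROOFS =====

-- A's frequency loop computes the multiplicity of each element.
lemma pvFreq_getD (l : List Int) (d : PySem.Dict Int Int) (v : Int) :
    (l.foldl (fun d num => if d.contains num then d.modify num 0 (· + 1) else d.insert num 1) d).getD v 0
      = d.getD v 0 + l.count v := by
  induction l generalizing d with
  | nil => simp
  | cons x t ih =>
    simp only [List.foldl_cons]
    rw [List.count_cons]
    push_cast
    by_cases hc : d.contains x
    · rw [if_pos hc, ih, PySem.Dict.getD_modify]
      by_cases hvx : v = x
      · subst hvx; simp; ring
      · simp [hvx, Ne.symm hvx]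
    · rw [if_neg hc, ih, PySem.Dict.getD_insert]
      by_cases hvx : v = x
      · subst hvx
        rw [if_pos rfl, PySem.Dict.getD_of_not_contains d 0 (by simpa using hc)]
        simp
        omega
      · simp [hvx, Ne.symm hvx]

-- On a sorted list, the adjacency sweep equals the count-is-1 filter.
lemma pvSweep_eq_filter_aux : ∀ (n : Nat) (s : List Int), s.length ≤ n → s.Pairwise (· ≤ ·) →
    s.filter (fun num => s.count num == 1) = pvSweep s := by
  intro n
  induction n with
  | zero =>
    intro s hlen _
    have : s = [] := List.eq_nil_of_length_eq_zero (Nat.le_zero.mp hlen)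
    subst this; simp [pvSweep]
  | succ n ih =>
    intro s hlen hs
    cases s with
    | nil => simp [pvSweep]
    | cons x rest =>
      have hsplit : rest = rest.takeWhile (fun y => y == x) ++ rest.dropWhile (fun y => y == x) :=
        (List.takeWhile_append_dropWhile).symm
      have hle : ∀ y ∈ rest, x ≤ y := fun y hy => (List.pairwise_cons.mp hs).1 y hy
      have hrestP : rest.Pairwise (· ≤ ·) := (List.pairwise_cons.mp hs).2
      have hrunEq : ∀ y ∈ rest.takeWhile (fun y => y == x), y = x := by
        intro y hy
        have := List.mem_takeWhile_imp hy
        simpa using this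
      have hrest'ne : ∀ y ∈ rest.dropWhile (fun y => y == x), y ≠ x := by
        intro y hy
        cases hdw : rest.dropWhile (fun y => y == x) with
        | nil => rw [hdw] at hy; cases hy
        | cons z t =>
          have hzne : z ≠ x := by
            have := List.head_dropWhile_not (p := fun y => y == x) (l := rest) (by simp [hdw])
            simp only [hdw] at this
            simpa using this
          have hzle : z ≤ y := by
            rw [hdw] at hy
            rcases List.mem_cons.mp hy with rfl | hyt
            · exact le_refl _
            · have hP' : (z :: t).Pairwise (· ≤ ·) := by
                rw [← hdw]; exact hrestP.sublist (List.dropWhile_sublist _)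
              exact (List.pairwise_cons.mp hP').1 y hyt
          have hxz : x ≤ z :=
            hle z ((List.dropWhile_sublist (l := rest) (p := fun y => y == x)).subset
              (by rw [hdw]; exact List.mem_cons_self))
          intro h; subst h
          exact hzne (le_antisymm hzle hxz)
      have hrest'P : (rest.dropWhile (fun y => y == x)).Pairwise (· ≤ ·) :=
        hrestP.sublist (List.dropWhile_sublist _)
      have hrest'len : (rest.dropWhile (fun y => y == x)).length ≤ n := by
        have h1 := List.length_dropWhile_le (p := fun y => y == x) (l := rest)
        simp only [List.length_cons] at hlen
        omega
      have hcx : (x :: rest).count x = 1 + (rest.takeWhile (fun y => y == x)).length := by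
        rw [List.count_cons_self]
        conv_lhs => rw [hsplit]
        rw [List.count_append]
        have h1 : (rest.takeWhile (fun y => y == x)).count x
            = (rest.takeWhile (fun y => y == x)).length :=
          List.count_eq_length.mpr (fun y hy => by simp [hrunEq y hy])
        have h2 : (rest.dropWhile (fun y => y == x)).count x = 0 :=
          List.count_eq_zero.mpr (fun hmem => (hrest'ne x hmem) rfl)
        omega
      have hcount' : ∀ y ∈ rest.dropWhile (fun y => y == x),
          (x :: rest).count y = (rest.dropWhile (fun y => y == x)).count y := by
        intro y hy
        have hyx : y ≠ x := hrest'ne y hy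
        conv_lhs => rw [hsplit]
        rw [List.count_cons, List.count_append]
        have h0 : (x == y) = false := by simpa using Ne.symm hyx
        have h1 : (rest.takeWhile (fun y => y == x)).count y = 0 :=
          List.count_eq_zero.mpr (fun hmem => hyx (hrunEq y hmem))
        rw [h0, h1]
        simp
      set P : Int → Bool := fun num => (x :: rest).count num == 1 with hPdef
      have hrunFilter : (rest.takeWhile (fun y => y == x)).filter P = [] := by
        apply List.filter_eq_nil_iff.mpr
        intro y hy
        have hlen0 : 0 < (rest.takeWhile (fun y => y == x)).length := List.length_pos_of_mem hy
        rw [hPdef]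
        simp only [hrunEq y hy, hcx, beq_iff_eq]
        omega
      have hrest'Filter : (rest.dropWhile (fun y => y == x)).filter P
          = pvSweep (rest.dropWhile (fun y => y == x)) := by
        rw [← ih (rest.dropWhile (fun y => y == x)) hrest'len hrest'P]
        apply List.filter_congr
        intro y hy
        rw [hPdef]
        simp only [hcount' y hy]
      rw [List.filter_cons]
      conv_lhs => rw [hsplit]
      rw [List.filter_append, hrunFilter, hrest'Filter, pvSweep]
      simp only [List.nil_append]
      rcases h : rest.takeWhile (fun y => y == x) with _ | ⟨z, t⟩
      · have hb : P x = true := by rw [hPdef]; simp only [hcx, h]; simp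
        rw [if_pos hb]
        simp
      · have hb : P x = false := by
          rw [hPdef]
          simp only [hcx, h, List.length_cons, beq_iff_eq]
          simp
        rw [if_neg (by simp [hb])]
        simp

lemma pvSweep_eq_filter (s : List Int) (hs : s.Pairwise (· ≤ ·)) :
    s.filter (fun num => s.count num == 1) = pvSweep s :=
  pvSweep_eq_filter_aux s.length s (le_refl _) hs

-- ===== VERDICT (by name: the statement is the Claim_ definition above) =====
theorem remove_duplicates_entirely_spec : Claim_equal_remove_duplicates_entirely := by
  intro arr _
  unfold Spec_remove_duplicates_entirely remove_duplicates_entirely remove_duplicates_entirely_alt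
  have hP : (PySem.List.sorted arr (fun x => x) false).Pairwise (· ≤ ·) := by
    simpa using PySem.List.sorted_pairwise (xs := arr) (key := fun x => x)
  rw [← pvSweep_eq_filter _ hP]
  apply List.filter_congr
  intro y _
  rw [pvFreq_getD (PySem.List.sorted arr (fun x => x) false) PySem.Dict.empty y, PySem.Dict.getD_empty, zero_add]
  rcases eq_or_ne ((PySem.List.sorted arr (fun x => x) false).count y) 1 with h | h
  · simp [h]
  · have h' : (((PySem.List.sorted arr (fun x => x) false).count y : Int)) ≠ 1 := by
      exact_mod_cast h
    simp [h, h']
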